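-- pv_equiv track=rewrite | github.com/sourcehold/OpenSHC | tools/mcp/ghidra_scripts/functionexport_preprocessor.py | strip_ghidra_signature_comments
-- ===== SOURCE A (Python) =====
-- def strip_ghidra_signature_comments(source):
--     """
--     Remove the Ghidra-emitted block comment header (===... lines) if present,
--     since the reimplementation will have its own header.
--     """
--     lines = source.splitlines()
--     out = []
--     in_header = False
--     header_done = False
--     for line in lines:
--         if not header_done:
--             stripped = line.strip()
--             if stripped.startswith('// ====='):
--                 in_header = True
--                 continue
--             if in_header:
--                 if stripped.startswith('//'):
--                     continue  # still in header block
--                 else: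
--                     in_header = False
--                     header_done = True
--         out.append(line)
--     return '\n'.join(out)
-- ===== SOURCE B (Python) =====
-- def strip_ghidra_signature_comments(source):
--     """
--     Remove the Ghidra-emitted block comment header (===... lines) if present,
--     since the reimplementation will have its own header.
--     """
--     lines = source.splitlines()
--     start = next((i for i, ln in enumerate(lines)
--                   if ln.strip().startswith('// =====')), None)
--     if start is None:
--         return '\n'.join(lines)
--     j = start + 1
--     while j < len(lines) and lines[j].strip().startswith('//'):
--         j += 1
--     return '\n'.join(lines[:start] + lines[j:])
-- ===== Notes on version B (the rewrite author's own statement) =====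
-- stated objective: simpler
-- what changed: Replaced the per-line in_header/header_done state machine with locating the header's start and end indices once and joining the surrounding slices.
import Mathlib
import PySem

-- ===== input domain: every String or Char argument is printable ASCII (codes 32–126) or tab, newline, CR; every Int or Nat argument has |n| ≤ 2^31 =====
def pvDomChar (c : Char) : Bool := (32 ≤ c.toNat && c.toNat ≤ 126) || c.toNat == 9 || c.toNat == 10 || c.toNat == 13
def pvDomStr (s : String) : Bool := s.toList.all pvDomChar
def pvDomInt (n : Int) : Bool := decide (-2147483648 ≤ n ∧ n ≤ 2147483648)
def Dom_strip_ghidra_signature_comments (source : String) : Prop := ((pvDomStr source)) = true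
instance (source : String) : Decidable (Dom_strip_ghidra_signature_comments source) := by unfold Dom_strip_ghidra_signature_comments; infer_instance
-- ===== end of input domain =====

-- B replaces A's per-line in_header/header_done state machine by locating the header's
-- start and end indices and joining the surrounding slices (objective: simpler).

-- ===== PORT A =====
-- one step of A's for-loop; state = (out, in_header, header_done)
def stepA (st : List String × Bool × Bool) (line : String) : List String × Bool × Bool :=
  let (out, in_header, header_done) := st
  if header_done then (out ++ [line], in_header, header_done)
  else
    let stripped := PySem.Str.strip line
    if PySem.Str.startswith stripped "// =====" then (out, true, header_done)
    else if in_header then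
      if PySem.Str.startswith stripped "//" then (out, in_header, header_done)
      else (out ++ [line], false, true)
    else (out ++ [line], in_header, header_done)

def strip_ghidra_signature_comments (source : String) : String :=
  let lines := PySem.Str.splitlines source
  PySem.Str.join "\n" ((lines.foldl stepA ([], false, false)).1)

-- ===== PORT B =====
-- first index whose stripped form starts with '// ====='
def findStart (lines : List String) (i : Nat) : Option Nat :=
  match lines with
  | [] => none
  | ln :: rest =>
    if PySem.Str.startswith (PySem.Str.strip ln) "// =====" then some i
    else findStart rest (i + 1)

-- the while-loop advancing j: number of leading '//' lines
def skipCount (lines : List String) : Nat :=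
  match lines with
  | [] => 0
  | ln :: rest =>
    if PySem.Str.startswith (PySem.Str.strip ln) "//" then skipCount rest + 1 else 0

def strip_ghidra_signature_comments_alt (source : String) : String :=
  let lines := PySem.Str.splitlines source
  match findStart lines 0 with
  | none => PySem.Str.join "\n" lines
  | some start =>
    let j := start + 1 + skipCount (lines.drop (start + 1))
    PySem.Str.join "\n" (lines.take start ++ lines.drop j)

-- ===== PRECONDITION & SPEC =====
def Spec_strip_ghidra_signature_comments (source : String) (out : String) : Prop := out = strip_ghidra_signature_comments_alt source
instance (source : String) (out : String) : Decidable (Spec_strip_ghidra_signature_comments source out) := by unfold Spec_strip_ghidra_signature_comments; infer_instance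

-- ===== CLAIM (what is proved, stated in full; the proofs are below) =====
def Claim_equal_strip_ghidra_signature_comments : Prop := ∀ (source : String), Dom_strip_ghidra_signature_comments source → Spec_strip_ghidra_signature_comments source (strip_ghidra_signature_comments source)

-- ===== LEMMAS AND PROOFS =====

-- '// =====' starts with '//'
theorem startswith_hdr_imp (cs : List Char)
    (h : PySem.Chars.startswith cs ['/', '/', ' ', '=', '=', '=', '=', '='] = true) :
    PySem.Chars.startswith cs ['/', '/'] = true := by
  rw [PySem.Chars.startswith_iff] at h ⊢
  exact List.IsPrefix.trans (by decide) h

-- once header_done, the loop appends everything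
theorem foldl_stepA_done (xs : List String) (out : List String) (ih : Bool) :
    (xs.foldl stepA (out, ih, true)).1 = out ++ xs := by
  induction xs generalizing out ih with
  | nil => simp
  | cons ln rest IH => simp [stepA, IH]

-- inside the header, the loop drops the leading '//' lines and appends the rest
theorem foldl_stepA_inhdr (xs : List String) (out : List String) :
    (xs.foldl stepA (out, true, false)).1 = out ++ xs.drop (skipCount xs) := by
  induction xs generalizing out with
  | nil => simp
  | cons ln rest IH =>
    by_cases h1 : PySem.Chars.startswith (PySem.Chars.strip ln.toList)
        ['/', '/', ' ', '=', '=', '=', '=', '='] = true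
    · simp [stepA, h1, skipCount, startswith_hdr_imp _ h1, IH]
    · by_cases h2 : PySem.Chars.startswith (PySem.Chars.strip ln.toList) ['/', '/'] = true
      · simp [stepA, h1, h2, skipCount, IH]
      · simp [stepA, h1, h2, skipCount, foldl_stepA_done]

-- the result of B's index computation as a direct recursion over the lines
def altList (xs : List String) : List String :=
  match xs with
  | [] => []
  | ln :: rest =>
    if PySem.Str.startswith (PySem.Str.strip ln) "// =====" then rest.drop (skipCount rest)
    else ln :: altList rest

theorem foldl_stepA_init (xs : List String) (out : List String) :
    (xs.foldl stepA (out, false, false)).1 = out ++ altList xs := by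
  induction xs generalizing out with
  | nil => simp [altList]
  | cons ln rest IH =>
    by_cases h1 : PySem.Chars.startswith (PySem.Chars.strip ln.toList)
        ['/', '/', ' ', '=', '=', '=', '=', '='] = true
    · simp [stepA, h1, altList, foldl_stepA_inhdr]
    · simp [stepA, h1, altList, IH]

theorem findStart_shift (xs : List String) (i : Nat) :
    findStart xs i = (findStart xs 0).map (· + i) := by
  induction xs generalizing i with
  | nil => simp [findStart]
  | cons ln rest IH =>
    by_cases h : PySem.Str.startswith (PySem.Str.strip ln) "// =====" = true
    · simp only [findStart]
      rw [if_pos h, if_pos h]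
      simp
    · simp only [findStart]
      rw [if_neg h, if_neg h, IH (i + 1), IH 1]
      cases findStart rest 0 with
      | none => simp
      | some s => simp; omega

-- B's slice-based computation equals the recursion altList
theorem bcore_eq_altList (xs : List String) :
    (match findStart xs 0 with
     | none => xs
     | some start => xs.take start ++ xs.drop (start + 1 + skipCount (xs.drop (start + 1)))) =
    altList xs := by
  induction xs with
  | nil => simp [findStart, altList]
  | cons ln rest IH =>
    by_cases h : PySem.Str.startswith (PySem.Str.strip ln) "// =====" = true
    · simp only [findStart, altList]
      rw [if_pos h, if_pos h]
      simp only [List.take_zero, List.nil_append, Nat.zero_add, List.drop_one, List.tail_cons]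
      rw [show 1 + skipCount rest = skipCount rest + 1 by omega, List.drop_succ_cons]
    · simp only [findStart, altList]
      rw [if_neg h, if_neg h, findStart_shift rest 1]
      cases hf : findStart rest 0 with
      | none =>
        simp only [hf] at IH
        simp only [Option.map_none]
        rw [← IH]
      | some s =>
        simp only [hf] at IH
        simp only [Option.map_some, List.take_succ_cons, List.drop_succ_cons]
        rw [show s + 1 + 1 + skipCount (List.drop (s + 1) rest)
              = (s + 1 + skipCount (List.drop (s + 1) rest)) + 1 by omega,
          List.drop_succ_cons, ← IH]
        simp

-- ===== VERDICT (by name: the statement is the Claim_ definition above) =====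
theorem strip_ghidra_signature_comments_spec : Claim_equal_strip_ghidra_signature_comments := by
  intro source _
  unfold Spec_strip_ghidra_signature_comments
  unfold strip_ghidra_signature_comments strip_ghidra_signature_comments_alt
  have hb := bcore_eq_altList (PySem.Str.splitlines source)
  simp only [foldl_stepA_init, List.nil_append]
  cases hf : findStart (PySem.Str.splitlines source) 0 <;>
    simp only [hf] at hb ⊢ <;> rw [← hb]
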